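-- pv_equiv track=rewrite | github.com/wlaub/pybld | game.py | extractSaveName
-- ===== SOURCE A (Python) =====
-- def extractSaveName(cmd):
--     """
--     Extracts a save file name by returning the first word
--     after "save" or "load".
--     """
--     parts = cmd.split(' ')
--     next = False
--     for p in parts:
--         if next:
--             return p
--         if p == 'save' or p == 'load':
--             next = True
--     return None
-- ===== SOURCE B (Python) =====
-- def extractSaveName(cmd):
--     """
--     Extracts a save file name by returning the first word
--     after "save" or "load".
--     """
--     parts = cmd.split(' ')
--     n = len(parts)
--     i = parts.index('save') if 'save' in parts else n
--     j = parts.index('load') if 'load' in parts else n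
--     k = min(i, j)
--     return parts[k + 1] if k + 1 < n else None
-- ===== Notes on version B (the rewrite author's own statement) =====
-- stated objective: alternative
-- what changed: Replaces the stateful flag-driven single-pass scan with locate-then-index arithmetic: find the first positions of 'save' and 'load' (missing keyword = len(parts)), take their min, and return the element one past it if it exists.
import Mathlib
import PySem

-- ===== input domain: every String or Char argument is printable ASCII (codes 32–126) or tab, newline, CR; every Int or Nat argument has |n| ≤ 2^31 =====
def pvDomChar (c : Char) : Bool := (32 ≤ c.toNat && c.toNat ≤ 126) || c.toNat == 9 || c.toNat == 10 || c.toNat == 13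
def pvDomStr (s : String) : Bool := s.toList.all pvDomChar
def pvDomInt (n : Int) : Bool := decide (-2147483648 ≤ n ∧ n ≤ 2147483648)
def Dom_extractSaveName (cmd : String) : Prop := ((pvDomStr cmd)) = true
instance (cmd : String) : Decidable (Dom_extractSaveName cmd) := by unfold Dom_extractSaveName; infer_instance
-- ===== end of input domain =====

-- B replaces A's flag-driven scan with locate-then-index arithmetic (min of the two keyword positions); alternative decomposition, same cost.

-- ===== PORT A =====
-- A's for-loop over parts with the 'next' flag, returning inside the loop.
def extractSaveNameLoop : List String → Bool → Option String
  | [], _ => none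
  | p :: rest, next =>
    if next then some p
    else extractSaveNameLoop rest (p == "save" || p == "load")

def extractSaveName (cmd : String) : Option String :=
  extractSaveNameLoop ((PySem.Str.split? cmd " ").getD []) false

-- ===== PORT B =====
def extractSaveName_alt (cmd : String) : Option String :=
  let parts := (PySem.Str.split? cmd " ").getD []
  let n := parts.length
  let i := (PySem.List.index? parts "save").getD n
  let j := (PySem.List.index? parts "load").getD n
  let k := min i j
  if k + 1 < n then parts[k + 1]? else none

-- ===== PRECONDITION & SPEC =====
def Spec_extractSaveName (cmd : String) (out : Option String) : Prop := out = extractSaveName_alt cmd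
instance (cmd : String) (out : Option String) : Decidable (Spec_extractSaveName cmd out) := by unfold Spec_extractSaveName; infer_instance

-- ===== CLAIM (what is proved, stated in full; the proofs are below) =====
def Claim_equal_extractSaveName : Prop := ∀ (cmd : String), Dom_extractSaveName cmd → Spec_extractSaveName cmd (extractSaveName cmd)

-- ===== LEMMAS AND PROOFS =====

-- B's body, as a function of the split list alone.
def pvAltCore (l : List String) : Option String :=
  l[(min ((PySem.List.index? l "save").getD l.length)
         ((PySem.List.index? l "load").getD l.length)) + 1]?

lemma pvAltCore_eq (l : List String) :
    (let n := l.length;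
     let i := (PySem.List.index? l "save").getD n;
     let j := (PySem.List.index? l "load").getD n;
     let k := min i j;
     if k + 1 < n then l[k + 1]? else none) = pvAltCore l := by
  simp only [pvAltCore]
  split_ifs with h
  · rfl
  · exact (List.getElem?_eq_none (by omega)).symm

lemma loop_true (l : List String) : extractSaveNameLoop l true = l.head? := by
  cases l <;> simp [extractSaveNameLoop]

lemma index?_getD_cons_of_ne (p v : String) (l : List String) (h : ¬ p = v) :
    (PySem.List.index? (p :: l) v).getD (p :: l).length
      = (PySem.List.index? l v).getD l.length + 1 := by
  rw [PySem.List.index?_eq_idxOf?, PySem.List.index?_eq_idxOf?]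
  simp [List.idxOf?_cons, h]

lemma loop_false (l : List String) : extractSaveNameLoop l false = pvAltCore l := by
  induction l with
  | nil => simp [extractSaveNameLoop, pvAltCore, PySem.List.index?]
  | cons p rest ih =>
    by_cases hs : p = "save"
    · subst hs
      rw [show extractSaveNameLoop ("save" :: rest) false = extractSaveNameLoop rest true from
            by simp [extractSaveNameLoop],
          loop_true, List.head?_eq_getElem?]
      simp only [pvAltCore]
      rw [PySem.List.index?_cons_self]
      simp
    · by_cases hl : p = "load"
      · subst hl
        rw [show extractSaveNameLoop ("load" :: rest) false = extractSaveNameLoop rest true from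
              by simp [extractSaveNameLoop],
            loop_true, List.head?_eq_getElem?]
        simp only [pvAltCore]
        rw [PySem.List.index?_cons_self]
        simp
      · have hstep : extractSaveNameLoop (p :: rest) false = extractSaveNameLoop rest false := by
          have : (p == "save" || p == "load") = false := by simp [hs, hl]
          simp [extractSaveNameLoop, this]
        rw [hstep, ih]
        simp only [pvAltCore]
        rw [index?_getD_cons_of_ne p "save" rest hs,
            index?_getD_cons_of_ne p "load" rest hl]
        have : min ((PySem.List.index? rest "save").getD rest.length + 1)
                   ((PySem.List.index? rest "load").getD rest.length + 1)
             = min ((PySem.List.index? rest "save").getD rest.length)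
                   ((PySem.List.index? rest "load").getD rest.length) + 1 := by omega
        rw [this]
        simp

-- ===== VERDICT (by name: the statement is the Claim_ definition above) =====
theorem extractSaveName_spec : Claim_equal_extractSaveName := by
  intro cmd _
  unfold Spec_extractSaveName extractSaveName extractSaveName_alt
  rw [pvAltCore_eq]
  exact loop_false _
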